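-- pv_equiv track=rewrite | github.com/susuint/gittv-vn | iptv_generator_smart_geo.py | detect_ip_region
-- ===== SOURCE A (Python) =====
-- ASIAN_IP_RANGES = {
--     # Vietnam
--     '14.': 'VN', '27.': 'VN', '42.': 'VN', '43.': 'VN',
--     '103.': 'SEA', '113.': 'VN', '115.': 'VN', '116.': 'VN',
--     '118.': 'VN', '123.': 'VN', '171.': 'VN', '222.': 'VN',
--
--     # Singapore (major IPTV hub)
--     '8.': 'SG', '18.': 'SG', '52.': 'SG', '54.': 'SG',
--     '13.': 'SG', '35.': 'SG',  # AWS/GCP Singapore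
--
--     # Asia general
--     '1.': 'ASIA', '110.': 'ASIA', '111.': 'ASIA',
--     '112.': 'ASIA', '114.': 'ASIA', '117.': 'ASIA',
--     '119.': 'ASIA', '120.': 'ASIA', '121.': 'ASIA',
--     '122.': 'ASIA', '124.': 'ASIA', '125.': 'ASIA',
-- }
--
-- def detect_ip_region(ip):
--     """Detect region from IP address patterns"""
--     if not ip:
--         return 'UNKNOWN', 0
--
--     # Check IP prefix
--     for prefix, region in ASIAN_IP_RANGES.items():
--         if ip.startswith(prefix):
--             if region == 'VN':
--                 return 'VN', 100
--             elif region == 'SG':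
--                 return 'SG', 95
--             elif region == 'SEA':
--                 return 'SEA', 90
--             elif region == 'ASIA':
--                 return 'ASIA', 80
--
--     return 'UNKNOWN', 0
-- ===== SOURCE B (Python) =====
-- _PREFIX_INFO = {
--     '14.': ('VN', 100),
--     '27.': ('VN', 100),
--     '42.': ('VN', 100),
--     '43.': ('VN', 100),
--     '103.': ('SEA', 90),
--     '113.': ('VN', 100),
--     '115.': ('VN', 100),
--     '116.': ('VN', 100),
--     '118.': ('VN', 100),
--     '123.': ('VN', 100),
--     '171.': ('VN', 100),
--     '222.': ('VN', 100),
--     '8.': ('SG', 95),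
--     '18.': ('SG', 95),
--     '52.': ('SG', 95),
--     '54.': ('SG', 95),
--     '13.': ('SG', 95),
--     '35.': ('SG', 95),
--     '1.': ('ASIA', 80),
--     '110.': ('ASIA', 80),
--     '111.': ('ASIA', 80),
--     '112.': ('ASIA', 80),
--     '114.': ('ASIA', 80),
--     '117.': ('ASIA', 80),
--     '119.': ('ASIA', 80),
--     '120.': ('ASIA', 80),
--     '121.': ('ASIA', 80),
--     '122.': ('ASIA', 80),
--     '124.': ('ASIA', 80),
--     '125.': ('ASIA', 80),
-- }
--
--
-- def detect_ip_region(ip):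
--     """Detect region from IP address patterns"""
--     if not ip:
--         return 'UNKNOWN', 0
--     head, sep, _rest = ip.partition('.')
--     return _PREFIX_INFO.get(head + sep, ('UNKNOWN', 0))
-- ===== Notes on version B (the rewrite author's own statement) =====
-- stated objective: idiomatic
-- what changed: The scan loop over 30 prefixes with a four-way region branch chain is replaced by extracting the first-octet key via str.partition('.') and a single lookup in a precomputed prefix->(region,score) dict.
import Mathlib
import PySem

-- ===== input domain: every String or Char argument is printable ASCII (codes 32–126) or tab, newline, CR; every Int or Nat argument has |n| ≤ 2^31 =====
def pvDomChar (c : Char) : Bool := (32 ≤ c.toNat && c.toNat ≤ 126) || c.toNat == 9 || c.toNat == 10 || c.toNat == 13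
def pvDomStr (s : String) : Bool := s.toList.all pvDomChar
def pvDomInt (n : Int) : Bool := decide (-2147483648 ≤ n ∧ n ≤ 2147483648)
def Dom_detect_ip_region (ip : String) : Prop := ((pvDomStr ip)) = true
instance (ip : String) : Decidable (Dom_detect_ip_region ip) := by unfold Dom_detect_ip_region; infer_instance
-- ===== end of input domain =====

-- B replaces A's prefix-scan loop + region branch chain by a first-octet key
-- extraction (str.partition('.')) and one lookup in a precomputed prefix → (region, score) table (objective: idiomatic).

-- ===== PORT A =====
-- ASIAN_IP_RANGES.items() in insertion order
def asianIpRanges : List (String × String) :=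
  [("14.", "VN"), ("27.", "VN"), ("42.", "VN"), ("43.", "VN"), ("103.", "SEA"),
   ("113.", "VN"), ("115.", "VN"), ("116.", "VN"), ("118.", "VN"), ("123.", "VN"),
   ("171.", "VN"), ("222.", "VN"), ("8.", "SG"), ("18.", "SG"), ("52.", "SG"),
   ("54.", "SG"), ("13.", "SG"), ("35.", "SG"), ("1.", "ASIA"), ("110.", "ASIA"),
   ("111.", "ASIA"), ("112.", "ASIA"), ("114.", "ASIA"), ("117.", "ASIA"),
   ("119.", "ASIA"), ("120.", "ASIA"), ("121.", "ASIA"), ("122.", "ASIA"),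
   ("124.", "ASIA"), ("125.", "ASIA")]

-- the `for prefix, region in …: if ip.startswith(prefix): if/elif …` loop;
-- falling past the elif chain continues the loop, as in Python
def detectGo (ip : String) : List (String × String) → String × Int
  | [] => ("UNKNOWN", 0)
  | (pre, region) :: rest =>
    if PySem.Str.startswith ip pre then
      if region = "VN" then ("VN", 100)
      else if region = "SG" then ("SG", 95)
      else if region = "SEA" then ("SEA", 90)
      else if region = "ASIA" then ("ASIA", 80)
      else detectGo ip rest
    else detectGo ip rest

def detect_ip_region (ip : String) : String × Int :=
  if ip = "" then ("UNKNOWN", 0)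
  else detectGo ip asianIpRanges

-- ===== PORT B =====
def prefixInfo : PySem.Dict String (String × Int) := PySem.Dict.ofList
  [("14.", ("VN", 100)), ("27.", ("VN", 100)), ("42.", ("VN", 100)), ("43.", ("VN", 100)),
   ("103.", ("SEA", 90)), ("113.", ("VN", 100)), ("115.", ("VN", 100)), ("116.", ("VN", 100)),
   ("118.", ("VN", 100)), ("123.", ("VN", 100)), ("171.", ("VN", 100)), ("222.", ("VN", 100)),
   ("8.", ("SG", 95)), ("18.", ("SG", 95)), ("52.", ("SG", 95)), ("54.", ("SG", 95)),
   ("13.", ("SG", 95)), ("35.", ("SG", 95)), ("1.", ("ASIA", 80)), ("110.", ("ASIA", 80)),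
   ("111.", ("ASIA", 80)), ("112.", ("ASIA", 80)), ("114.", ("ASIA", 80)), ("117.", ("ASIA", 80)),
   ("119.", ("ASIA", 80)), ("120.", ("ASIA", 80)), ("121.", ("ASIA", 80)), ("122.", ("ASIA", 80)),
   ("124.", ("ASIA", 80)), ("125.", ("ASIA", 80))]

def detect_ip_region_alt (ip : String) : String × Int :=
  if ip = "" then ("UNKNOWN", 0)
  else
    -- hand port of ip.partition('.') for the one-character separator '.';
    -- exact: head = chars before the first '.', sep = "." iff a '.' occurs
    let head := ip.toList.takeWhile (· ≠ '.')
    let sep := if '.' ∈ ip.toList then ['.'] else []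
    prefixInfo.getD (String.ofList (head ++ sep)) ("UNKNOWN", 0)

-- ===== PRECONDITION & SPEC =====
def Spec_detect_ip_region (ip : String) (out : String × Int) : Prop := out = detect_ip_region_alt ip
instance (ip : String) (out : String × Int) : Decidable (Spec_detect_ip_region ip out) := by unfold Spec_detect_ip_region; infer_instance

-- ===== CLAIM (what is proved, stated in full; the proofs are below) =====
def Claim_equal_detect_ip_region : Prop := ∀ (ip : String), Dom_detect_ip_region ip → Spec_detect_ip_region ip (detect_ip_region ip)

-- ===== LEMMAS AND PROOFS =====

-- the first-octet key of a character list
def keyL (l : List Char) : List Char :=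
  l.takeWhile (· ≠ '.') ++ (if '.' ∈ l then ['.'] else [])

-- map an A-table entry to the corresponding B-table entry
def entryMap (pr : String × String) : String × (String × Int) :=
  (pr.1, if pr.2 = "VN" then ("VN", 100)
         else if pr.2 = "SG" then ("SG", 95)
         else if pr.2 = "SEA" then ("SEA", 90)
         else ("ASIA", 80))

lemma takeWhile_append_dot (d t : List Char) (hd : '.' ∉ d) :
    (d ++ '.' :: t).takeWhile (· ≠ '.') = d := by
  induction d with
  | nil => simp
  | cons c cs ih =>
    have hc : c ≠ '.' := by intro h; exact hd (h ▸ List.mem_cons_self)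
    have h2 : '.' ∉ cs := fun h => hd (List.mem_cons_of_mem _ h)
    rw [List.cons_append, List.takeWhile_cons, if_pos (by simp [hc])]
    rw [ih h2]

lemma dropWhile_cons_head {p : Char → Bool} {l t : List Char} {c : Char}
    (h : l.dropWhile p = c :: t) : p c = false := by
  induction l with
  | nil => simp [List.dropWhile] at h
  | cons a as ih =>
    rw [List.dropWhile_cons] at h
    by_cases hp : p a
    · rw [if_pos hp] at h; exact ih h
    · rw [if_neg hp] at h
      cases h
      simpa using hp

lemma prefix_iff_key (l d : List Char) (hd : '.' ∉ d) :
    (d ++ ['.']) <+: l ↔ keyL l = d ++ ['.'] := by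
  constructor
  · rintro ⟨t, ht⟩
    have hl : l = d ++ '.' :: t := by rw [← ht]; simp
    subst hl
    unfold keyL
    rw [takeWhile_append_dot d t hd]
    have hmem : '.' ∈ d ++ '.' :: t := by simp
    rw [if_pos hmem]
  · intro hk
    unfold keyL at hk
    by_cases hmem : '.' ∈ l
    · rw [if_pos hmem] at hk
      have htw : l.takeWhile (· ≠ '.') = d := List.append_cancel_right hk
      have hdrop : l.dropWhile (· ≠ '.') ≠ [] := by
        intro h
        have h2 := List.takeWhile_append_dropWhile (p := fun x => decide (x ≠ '.')) (l := l)
        rw [h, List.append_nil] at h2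
        rw [← h2] at hmem
        have := List.mem_takeWhile_imp hmem
        simp at this
      obtain ⟨c, t, hct⟩ := List.exists_cons_of_ne_nil hdrop
      have hc : c = '.' := by simpa using dropWhile_cons_head hct
      subst hc
      refine ⟨t, ?_⟩
      have h4 := List.takeWhile_append_dropWhile (p := fun x => decide (x ≠ '.')) (l := l)
      rw [htw, hct] at h4
      rw [← h4]; simp
    · rw [if_neg hmem, List.append_nil] at hk
      exfalso
      have hmem2 : '.' ∈ l.takeWhile (· ≠ '.') := by rw [hk]; simp
      have := List.mem_takeWhile_imp hmem2
      simp at this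

-- decidable shape condition on a prefix: nonempty, ends in '.', no other '.'
def goodPrefix (p : String) : Prop :=
  p.toList ≠ [] ∧ p.toList.getLast? = some '.' ∧ '.' ∉ p.toList.dropLast

lemma goodPrefix_split {p : String} (h : goodPrefix p) :
    ∃ d, p.toList = d ++ ['.'] ∧ '.' ∉ d := by
  obtain ⟨hne, hlast, hnd⟩ := h
  refine ⟨p.toList.dropLast, ?_, hnd⟩
  have h1 := List.dropLast_append_getLast hne
  have h2 : p.toList.getLast hne = '.' := by
    have h3 : p.toList.getLast? = some (p.toList.getLast hne) := List.getLast?_eq_getLast ..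
    rw [h3, Option.some.injEq] at hlast
    exact hlast
  conv_lhs => rw [← h1]
  rw [h2]

lemma go_eq_getD (ip : String) (ta : List (String × String))
    (hta : ∀ pr ∈ ta, goodPrefix pr.1 ∧
      (pr.2 = "VN" ∨ pr.2 = "SG" ∨ pr.2 = "SEA" ∨ pr.2 = "ASIA")) :
    detectGo ip ta =
      (PySem.Dict.mk (ta.map entryMap)).getD (String.ofList (keyL ip.toList)) ("UNKNOWN", 0) := by
  induction ta with
  | nil => simp [detectGo, PySem.Dict.getD, PySem.Dict.get?]
  | cons hd tl ih =>
    obtain ⟨p, r⟩ := hd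
    obtain ⟨hgood, hr⟩ := hta (p, r) List.mem_cons_self
    obtain ⟨d, hpd, hdnd⟩ := goodPrefix_split hgood
    have ihtl := ih (fun pr hpr => hta pr (List.mem_cons_of_mem _ hpr))
    have hkey : PySem.Str.startswith ip p = true ↔ String.ofList (keyL ip.toList) = p := by
      constructor
      · intro h
        have hpref : p.toList <+: ip.toList := by
          rw [← PySem.Chars.startswith_iff]; simpa using h
        rw [hpd] at hpref
        have hk := (prefix_iff_key ip.toList d hdnd).mp hpref
        rw [hk, ← hpd]
        exact String.ofList_toList
      · intro h
        have hk : keyL ip.toList = d ++ ['.'] := by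
          rw [← hpd, ← h]; simp
        have hpref := (prefix_iff_key ip.toList d hdnd).mpr hk
        rw [← hpd] at hpref
        have := (PySem.Chars.startswith_iff ip.toList p.toList).mpr hpref
        simpa using this
    simp only [detectGo, List.map_cons, entryMap]
    rw [PySem.Dict.getD_eq_get?_getD, PySem.Dict.get?_mk_cons]
    by_cases hsw : PySem.Str.startswith ip p = true
    · have hk := hkey.mp hsw
      have hbeq : (p == String.ofList (keyL ip.toList)) = true := by simp [hk]
      rw [hsw, if_pos rfl, hbeq]
      have hr2 : r = "VN" ∨ r = "SG" ∨ r = "SEA" ∨ r = "ASIA" := hr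
      rcases hr2 with h | h | h | h <;> simp [h]
    · have hk : ¬ (String.ofList (keyL ip.toList) = p) := fun h => hsw (hkey.mpr h)
      have hbeq : (p == String.ofList (keyL ip.toList)) = false := by
        simp only [beq_eq_false_iff_ne, ne_eq]
        exact fun h => hk h.symm
      rw [hbeq]
      simp only [Bool.not_eq_true] at hsw
      rw [hsw]
      simp only [Bool.false_eq_true, if_false]
      rw [ihtl, PySem.Dict.getD_eq_get?_getD]

-- ===== VERDICT (by name: the statement is the Claim_ definition above) =====
theorem detect_ip_region_spec : Claim_equal_detect_ip_region := by
  intro ip _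
  unfold Spec_detect_ip_region detect_ip_region detect_ip_region_alt
  by_cases h : ip = ""
  · simp [h]
  · simp only [h, if_neg, not_false_iff]
    rw [go_eq_getD ip asianIpRanges (by simp only [goodPrefix]; decide)]
    have hpf : prefixInfo = PySem.Dict.mk (asianIpRanges.map entryMap) := by decide
    rw [hpf]
    rfl
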